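-- pv_equiv track=rewrite | github.com/Felix-neko/ocr_utils | analyze_gigapixel.py | get_processing_status
-- ===== SOURCE A (Python) =====
-- from typing import Dict, List, Set, Tuple
--
-- def get_processing_status(original_files: Set[str], processed_files: Dict[str, List[str]]) -> str:
--     """
--     Определяет статус обработки Gigapixel.
--
--     Возвращает:
--     - "complete" - все исходные файлы обработаны
--     - "partial" - часть файлов обработана
--     - "none" - нет обработанных файлов
--     """
--     if not original_files:
--         return "none"
--
--     processed_count = sum(1 for orig in original_files if orig in processed_files)
--
--     if processed_count == 0:
--         return "none"
--     elif processed_count == len(original_files):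
--         return "complete"
--     else:
--         return "partial"
-- ===== SOURCE B (Python) =====
-- def get_processing_status(original_files, processed_files):
--     """Inverted traversal: walk the dict keys, discarding each from a remainder
--     copy of the original set; judge by how the remainder shrank."""
--     remaining = set(original_files)
--     for key in processed_files:
--         remaining.discard(key)
--     if len(remaining) == len(original_files):
--         return "none"
--     if not remaining:
--         return "complete"
--     return "partial"
-- ===== Notes on version B (the rewrite author's own statement) =====
-- stated objective: alternative
-- what changed: Inverts the traversal: instead of counting originals found among the dict keys, B iterates over the dict keys discarding each from a remainder copy of the original set and decides from the remainder (unchanged => none, empty => complete, else partial); no membership test of originals against the dict and no counter.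
import Mathlib
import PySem

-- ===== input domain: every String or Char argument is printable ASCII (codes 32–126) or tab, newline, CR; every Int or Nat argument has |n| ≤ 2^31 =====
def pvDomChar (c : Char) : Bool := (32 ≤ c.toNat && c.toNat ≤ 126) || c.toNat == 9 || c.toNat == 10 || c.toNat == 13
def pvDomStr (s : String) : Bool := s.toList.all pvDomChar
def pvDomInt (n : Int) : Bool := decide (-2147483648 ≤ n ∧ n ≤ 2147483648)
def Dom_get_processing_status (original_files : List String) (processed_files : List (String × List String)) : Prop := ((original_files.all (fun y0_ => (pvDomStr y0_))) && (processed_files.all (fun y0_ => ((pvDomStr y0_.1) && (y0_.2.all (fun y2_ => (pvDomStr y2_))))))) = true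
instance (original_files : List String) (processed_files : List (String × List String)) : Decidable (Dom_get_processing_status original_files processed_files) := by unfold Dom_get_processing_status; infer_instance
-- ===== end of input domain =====

-- B inverts the traversal: it folds over the dict keys, discarding each from a remainder of the originals, instead of counting originals among the keys (alternative decomposition; same return value everywhere).


-- ===== PORT A =====
-- Literal port of A: early return on empty set, then count originals present among dict keys.
def get_processing_status (original_files : List String) (processed_files : List (String × List String)) : String :=
  if original_files = [] then "none"
  else
    let processed_count : Nat :=
      original_files.foldl
        (fun acc orig => if (processed_files.map Prod.fst).contains orig then acc + 1 else acc) 0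
    if processed_count = 0 then "none"
    else if processed_count = original_files.length then "complete"
    else "partial"

-- ===== PORT B =====
-- Port of B: fold over the dict entries, discarding each key from a remainder of the originals.
def get_processing_status_alt (original_files : List String) (processed_files : List (String × List String)) : String :=
  let remaining :=
    processed_files.foldl (fun rem kv => rem.filter (fun x => x ≠ kv.1)) original_files
  if remaining.length = original_files.length then "none"
  else if remaining = [] then "complete"
  else "partial"

-- ===== PRECONDITION & SPEC =====
def Spec_get_processing_status (original_files : List String) (processed_files : List (String × List String)) (out : String) : Prop := out = get_processing_status_alt original_files processed_files
instance (original_files : List String) (processed_files : List (String × List String)) (out : String) : Decidable (Spec_get_processing_status original_files processed_files out) := by unfold Spec_get_processing_status; infer_instance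

-- ===== CLAIM (what is proved, stated in full; the proofs are below) =====
def Claim_equal_get_processing_status : Prop := ∀ (original_files : List String) (processed_files : List (String × List String)), Dom_get_processing_status original_files processed_files → Spec_get_processing_status original_files processed_files (get_processing_status original_files processed_files)

-- ===== LEMMAS AND PROOFS =====

-- ===== VERDICT (by name: the statement is the Claim_ definition above) =====
theorem pv_count_foldl (l : List String) (p : String → Bool) (n : Nat) :
    l.foldl (fun acc o => if p o then acc + 1 else acc) n = n + l.countP p := by
  induction l generalizing n with
  | nil => simp
  | cons x xs ih =>
    simp only [List.foldl_cons, List.countP_cons]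
    by_cases h : p x = true
    · simp [h, ih]; omega
    · simp [h, ih]

theorem pv_fold_filter (pf : List (String × List String)) (o : List String) :
    pf.foldl (fun rem kv => rem.filter (fun x => x ≠ kv.1)) o
      = o.filter (fun x => !(pf.map Prod.fst).contains x) := by
  induction pf generalizing o with
  | nil => simp [List.filter_true]
  | cons kv rest ih =>
    simp only [List.foldl_cons, ih, List.filter_filter, List.map_cons, List.contains_cons]
    congr 1
    funext x
    by_cases h : x = kv.1 <;> simp [h]

theorem get_processing_status_spec : Claim_equal_get_processing_status := by
  intro o pf _
  unfold Spec_get_processing_status get_processing_status get_processing_status_alt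
  simp only [pv_fold_filter, pv_count_foldl, Nat.zero_add]
  set p : String → Bool := fun x => (pf.map Prod.fst).contains x with hp
  have hlenf : (o.filter (fun x => !p x)).length = o.countP (fun x => !p x) := by
    simp [List.countP_eq_length_filter]
  have hsum : o.countP p + o.countP (fun x => !p x) = o.length := by
    simpa using (List.length_eq_countP_add_countP (l := o) (p := p)).symm
  by_cases he : o = []
  · subst he; simp
  · rw [if_neg he]
    by_cases h0 : o.countP p = 0
    · have : (o.filter (fun x => !p x)).length = o.length := by omega
      rw [if_pos h0, if_pos this]
    · have hne : ¬ (o.filter (fun x => !p x)).length = o.length := by omega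
      rw [if_neg h0, if_neg hne]
      by_cases hc : o.countP p = o.length
      · have hz : (o.filter (fun x => !p x)).length = 0 := by omega
        have : o.filter (fun x => !p x) = [] := List.length_eq_zero_iff.mp (by omega)
        rw [if_pos hc, if_pos this]
      · have hpos : (o.filter (fun x => !p x)).length ≠ 0 := by omega
        have : ¬ o.filter (fun x => !p x) = [] := by
          intro h; exact hpos (by simp [h])
        rw [if_neg hc, if_neg this]
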